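-- pv_equiv track=rewrite | github.com/Remag29/AdventOfCode | 2023/12/part1.py | get_matching_positions
-- ===== SOURCE A (Python) =====
-- def get_matching_positions(possible_positions, numbers):
--     solutions = set()
--     for position in possible_positions:
--         blocks = position.split('.')
--         counts = [block.count('#') for block in blocks if block.count('#') > 0]
--         if counts == numbers:
--             solutions.add(position)
--
--     return solutions
-- ===== SOURCE B (Python) =====
-- def get_matching_positions(possible_positions, numbers):
--     # One left-to-right scan per position maintaining the current run's '#'-count,
--     # instead of splitting into blocks and counting each block.
--     solutions = set()
--     for position in possible_positions:
--         counts = []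
--         cur = 0
--         for ch in position:
--             if ch == '.':
--                 if cur > 0:
--                     counts.append(cur)
--                 cur = 0
--             elif ch == '#':
--                 cur += 1
--         if cur > 0:
--             counts.append(cur)
--         if counts == numbers:
--             solutions.add(position)
--     return solutions
-- ===== Notes on version B (the rewrite author's own statement) =====
-- stated objective: alternative
-- what changed: Replaces split('.') plus a per-block count('#') comprehension by a single character scan per position that maintains the current segment's '#'-count and flushes it at each '.' and at the end.
import Mathlib
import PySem

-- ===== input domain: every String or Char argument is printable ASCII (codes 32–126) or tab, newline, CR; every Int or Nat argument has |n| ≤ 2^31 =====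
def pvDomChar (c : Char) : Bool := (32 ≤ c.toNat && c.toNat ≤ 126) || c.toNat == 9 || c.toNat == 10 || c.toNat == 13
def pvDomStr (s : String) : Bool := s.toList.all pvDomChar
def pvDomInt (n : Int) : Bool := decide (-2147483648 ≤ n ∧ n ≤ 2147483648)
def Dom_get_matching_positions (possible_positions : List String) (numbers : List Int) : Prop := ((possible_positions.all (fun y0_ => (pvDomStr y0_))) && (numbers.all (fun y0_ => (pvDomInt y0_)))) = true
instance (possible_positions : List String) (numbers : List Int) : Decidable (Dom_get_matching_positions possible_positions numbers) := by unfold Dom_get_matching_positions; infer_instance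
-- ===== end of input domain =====

-- B replaces split('.') + per-block '#'-count comprehension by one scan per position
-- maintaining the current segment's '#'-count (single pass, no intermediate block list).

-- ===== PORT A =====
def get_matching_positions (possible_positions : List String) (numbers : List Int) : List String :=
  possible_positions.foldl (fun solutions position =>
    let blocks := PySem.Chars.splitOn position.toList ['.']
    let counts : List Int :=
      (blocks.filter (fun block => 0 < PySem.Chars.count block ['#'])).map
        (fun block => (PySem.Chars.count block ['#'] : Int))
    if counts = numbers then PySem.Set.add solutions position else solutions)
    PySem.Set.empty

-- ===== PORT B =====
def get_matching_positions_alt (possible_positions : List String) (numbers : List Int) : List String :=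
  possible_positions.foldl (fun solutions position =>
    let st := position.toList.foldl (fun (st : List Int × Int) ch =>
        if ch = '.' then ((if 0 < st.2 then st.1 ++ [st.2] else st.1), 0)
        else if ch = '#' then (st.1, st.2 + 1)
        else st) ([], 0)
    let counts := if 0 < st.2 then st.1 ++ [st.2] else st.1
    if counts = numbers then PySem.Set.add solutions position else solutions)
    PySem.Set.empty

-- ===== PRECONDITION & SPEC =====
def Spec_get_matching_positions (possible_positions : List String) (numbers : List Int) (out : List String) : Prop := out = get_matching_positions_alt possible_positions numbers
instance (possible_positions : List String) (numbers : List Int) (out : List String) : Decidable (Spec_get_matching_positions possible_positions numbers out) := by unfold Spec_get_matching_positions; infer_instance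

-- ===== CLAIM (what is proved, stated in full; the proofs are below) =====
def Claim_equal_get_matching_positions : Prop := ∀ (possible_positions : List String) (numbers : List Int), Dom_get_matching_positions possible_positions numbers → Spec_get_matching_positions possible_positions numbers (get_matching_positions possible_positions numbers)

-- ===== LEMMAS AND PROOFS =====

-- Simple structural split on '.' (spec for PySem.Chars.splitOn cs ['.']).
def splitDot : List Char → List (List Char)
  | [] => [[]]
  | c :: r =>
    if c = '.' then [] :: splitDot r
    else match splitDot r with
      | [] => [[c]]
      | h :: t => (c :: h) :: t

lemma splitDot_ne_nil (cs : List Char) : splitDot cs ≠ [] := by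
  cases cs with
  | nil => simp [splitDot]
  | cons c r =>
    simp only [splitDot]
    split_ifs
    · simp
    · cases h : splitDot r <;> simp

lemma splitDot_exists_cons (cs : List Char) : ∃ h t, splitDot cs = h :: t := by
  cases hs : splitDot cs with
  | nil => exact absurd hs (splitDot_ne_nil cs)
  | cons h t => exact ⟨h, t, rfl⟩

lemma count_go_spec (l : List Char) : ∀ (fuel : Nat) (acc : Nat), l.length ≤ fuel →
    PySem.Chars.count.go ['#'] fuel l acc = acc + l.count '#' := by
  induction l with
  | nil => intro fuel acc _; cases fuel <;> simp [PySem.Chars.count.go]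
  | cons c r ih =>
    intro fuel acc hle
    cases fuel with
    | zero => simp at hle
    | succ f =>
      have hle' : r.length ≤ f := by simpa using hle
      by_cases hc : c = '#'
      · subst hc
        simp [PySem.Chars.count.go, List.isPrefixOf, ih f (acc + 1) hle']
        omega
      · have : (['#'].isPrefixOf (c :: r)) = false := by
          simp [List.isPrefixOf]; exact fun h => absurd h.symm hc
        simp [PySem.Chars.count.go, this, ih f acc hle', hc]

lemma count_hash (l : List Char) : PySem.Chars.count l ['#'] = l.count '#' := by
  simpa [PySem.Chars.count] using count_go_spec l l.length 0 le_rfl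

lemma splitOn_go_spec (l : List Char) : ∀ (fuel : Nat) (cur : List Char) (rest : List (List Char)),
    l.length ≤ fuel →
    PySem.Chars.splitOn.go ['.'] fuel l cur rest = rest.reverse ++ (splitDot l).modifyHead (cur.reverse ++ ·) := by
  induction l with
  | nil =>
    intro fuel cur rest _
    cases fuel <;> simp [PySem.Chars.splitOn.go, splitDot]
  | cons c r ih =>
    intro fuel cur rest hle
    cases fuel with
    | zero => simp at hle
    | succ f =>
      have hle' : r.length ≤ f := by simpa using hle
      by_cases hc : c = '.'
      · subst hc
        simp only [PySem.Chars.splitOn.go]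
        rw [if_pos (by simp [List.isPrefixOf])]
        simp only [List.length_cons, List.drop_succ_cons, List.length_nil, List.drop_zero]
        rw [ih f [] (cur.reverse :: rest) hle']
        obtain ⟨h, t, hh⟩ := splitDot_exists_cons r
        simp [splitDot, hh]
      · have hpf : (['.'].isPrefixOf (c :: r)) = false := by
          simp [List.isPrefixOf]; exact fun h => absurd h.symm hc
        simp only [PySem.Chars.splitOn.go]
        rw [if_neg (by simp [hpf])]
        rw [ih f (c :: cur) rest hle']
        obtain ⟨h, t, hh⟩ := splitDot_exists_cons r
        simp [splitDot, hc, hh]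

lemma modifyHead_id' (l : List (List Char)) : l.modifyHead (fun x => x) = l := by
  cases l <;> simp

lemma splitOn_dot (cs : List Char) : PySem.Chars.splitOn cs ['.'] = splitDot cs := by
  have := splitOn_go_spec cs (cs.length + 1) [] [] (by omega)
  simpa [PySem.Chars.splitOn, modifyHead_id'] using this

-- The segment-count list produced from a block list, with k pending '#'s in the first block.
def specCounts (k : Nat) : List (List Char) → List Int
  | [] => []
  | h :: t =>
      (if 0 < k + h.count '#' then [((k + h.count '#' : Nat) : Int)] else []) ++
      ((t.filter (fun b => 0 < b.count '#')).map (fun b => ((b.count '#' : Nat) : Int)))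

-- B's scan step (same as in the port).
def stepB (st : List Int × Int) (ch : Char) : List Int × Int :=
  if ch = '.' then ((if 0 < st.2 then st.1 ++ [st.2] else st.1), 0)
  else if ch = '#' then (st.1, st.2 + 1)
  else st

lemma filter_map_cons (h : List Char) (t : List (List Char)) :
    (((h :: t).filter (fun b => 0 < b.count '#')).map (fun b => ((b.count '#' : Nat) : Int))) =
      (if 0 < h.count '#' then [((h.count '#' : Nat) : Int)] else []) ++
      ((t.filter (fun b => 0 < b.count '#')).map (fun b => ((b.count '#' : Nat) : Int))) := by
  by_cases hp : 0 < h.count '#'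
  · simp [List.count_pos_iff.mp hp, hp]
  · have hm : ¬ '#' ∈ h := by simpa using mt List.count_pos_iff.mpr hp
    simp [hp, hm]

lemma scan_spec (cs : List Char) : ∀ (k : Nat) (res : List Int),
    (if 0 < (cs.foldl stepB (res, (k : Int))).2
     then (cs.foldl stepB (res, (k : Int))).1 ++ [(cs.foldl stepB (res, (k : Int))).2]
     else (cs.foldl stepB (res, (k : Int))).1) = res ++ specCounts k (splitDot cs) := by
  induction cs with
  | nil =>
    intro k res
    simp only [List.foldl_nil, splitDot, specCounts, List.count_nil, Nat.add_zero]
    by_cases hk : 0 < k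
    · rw [if_pos (by exact_mod_cast hk), if_pos hk]; simp
    · rw [if_neg (by exact_mod_cast hk), if_neg hk]; simp
  | cons c r ih =>
    intro k res
    obtain ⟨h, t, hh⟩ := splitDot_exists_cons r
    by_cases hc : c = '.'
    · subst hc
      have hstep : stepB (res, (k : Int)) '.' =
          ((if 0 < (k : Int) then res ++ [(k : Int)] else res), 0) := by simp [stepB]
      simp only [List.foldl_cons, hstep]
      have hih := ih 0 (if 0 < (k : Int) then res ++ [(k : Int)] else res)
      simp only [Nat.cast_zero] at hih
      rw [hih]
      have hh2 : splitDot ('.' :: r) = [] :: splitDot r := by simp [splitDot]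
      rw [hh2, hh]
      simp only [specCounts, List.count_nil, Nat.add_zero, Nat.zero_add, filter_map_cons]
      by_cases hk : 0 < k
      · rw [if_pos (by exact_mod_cast hk), if_pos hk]; simp [List.append_assoc]
      · rw [if_neg (by exact_mod_cast hk), if_neg hk]; simp
    · by_cases hs : c = '#'
      · subst hs
        have hstep : stepB (res, (k : Int)) '#' = (res, (k : Int) + 1) := by simp [stepB]
        simp only [List.foldl_cons, hstep]
        have hcast : ((k : Int) + 1) = ((k + 1 : Nat) : Int) := by push_cast; ring
        rw [hcast, ih (k + 1) res]
        have hh2 : splitDot ('#' :: r) = ('#' :: h) :: t := by simp [splitDot, hh]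
        rw [hh2, hh]
        simp only [specCounts, List.count_cons_self]
        have harith : k + 1 + h.count '#' = k + (h.count '#' + 1) := by omega
        rw [harith]
      · have hstep : stepB (res, (k : Int)) c = (res, (k : Int)) := by simp [stepB, hc, hs]
        simp only [List.foldl_cons, hstep]
        rw [ih k res]
        have hh2 : splitDot (c :: r) = (c :: h) :: t := by simp [splitDot, hc, hh]
        rw [hh2, hh]
        have hcount : (c :: h).count '#' = h.count '#' := by simp [hs]
        simp only [specCounts, hcount]

-- Per-position agreement of the two count lists.
lemma counts_agree (position : String) :
    ((PySem.Chars.splitOn position.toList ['.']).filter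
        (fun block => 0 < PySem.Chars.count block ['#'])).map
        (fun block => (PySem.Chars.count block ['#'] : Int)) =
    (if 0 < (position.toList.foldl stepB ([], 0)).2
     then (position.toList.foldl stepB ([], 0)).1 ++ [(position.toList.foldl stepB ([], 0)).2]
     else (position.toList.foldl stepB ([], 0)).1) := by
  have hb := scan_spec position.toList 0 []
  simp only [Nat.cast_zero] at hb
  rw [hb, splitOn_dot]
  obtain ⟨h, t, hh⟩ := splitDot_exists_cons position.toList
  rw [hh]
  simp only [List.nil_append, specCounts, Nat.zero_add, filter_map_cons, count_hash]

-- ===== VERDICT (by name: the statement is the Claim_ definition above) =====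
theorem get_matching_positions_spec : Claim_equal_get_matching_positions := by
  intro possible_positions numbers hD
  clear hD
  unfold Spec_get_matching_positions get_matching_positions get_matching_positions_alt
  induction possible_positions using List.reverseRecOn with
  | nil => rfl
  | append_singleton l p ih =>
    simp only [List.foldl_append, List.foldl_cons, List.foldl_nil, ih]
    have h := counts_agree p
    rw [h]
    rfl
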